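-- pv_equiv track=rewrite | github.com/KMORaza/leetcode-solutions | LeetCode Solutions/2285.py | maximumImportance
-- ===== SOURCE A (Python) =====
-- from typing import List
--
-- def maximumImportance(n: int, roads: List[List[int]]) -> int:
--     connection_count = [0] * n
--     for a, b in roads:
--         connection_count[a] += 1
--         connection_count[b] += 1
--     city_connections = list(enumerate(connection_count))
--     city_connections.sort(key=lambda x: x[1], reverse=True)
--     value_assignment = [0] * n
--     for value, (city, _) in enumerate(city_connections, start=1):
--         value_assignment[city] = n - value + 1
--     total_importance = 0
--     for a, b in roads:
--         total_importance += value_assignment[a] + value_assignment[b]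
--     return total_importance
-- ===== SOURCE B (Python) =====
-- from typing import List
--
-- def maximumImportance(n: int, roads: List[List[int]]) -> int:
--     degree = [0] * n
--     for a, b in roads:
--         degree[a] += 1
--         degree[b] += 1
--     degree.sort()
--     total = 0
--     for value, d in enumerate(degree, start=1):
--         total += d * value
--     return total
-- ===== Notes on version B (the rewrite author's own statement) =====
-- stated objective: simpler
-- what changed: B keeps the one degree-counting pass but drops A's enumerate-sort-by-degree, value_assignment table and second scan over roads: it sorts the degree list ascending and returns sum of degree[i]*(i+1), the same greedy total computed directly from the sorted degrees.
import Mathlib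
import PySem

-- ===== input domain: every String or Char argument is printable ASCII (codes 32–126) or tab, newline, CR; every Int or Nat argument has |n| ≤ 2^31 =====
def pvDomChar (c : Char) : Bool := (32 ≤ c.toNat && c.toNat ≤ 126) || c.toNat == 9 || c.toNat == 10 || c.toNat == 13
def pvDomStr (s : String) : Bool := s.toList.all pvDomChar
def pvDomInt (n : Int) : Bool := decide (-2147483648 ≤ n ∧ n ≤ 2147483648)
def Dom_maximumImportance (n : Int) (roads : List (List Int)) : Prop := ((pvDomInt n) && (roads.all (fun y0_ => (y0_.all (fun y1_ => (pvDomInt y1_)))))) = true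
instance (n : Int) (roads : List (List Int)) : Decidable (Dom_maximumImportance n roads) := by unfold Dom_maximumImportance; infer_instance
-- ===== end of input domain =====

-- B drops A's enumerate/sort-by-degree, value_assignment table and second road scan:
-- it sorts the degree list ascending and sums degree[i]*(i+1) directly (simpler decomposition, same cost).


-- ===== PORT A =====
-- `xs[i] += 1` with Python index semantics (negative index wraps, out of range is
-- excluded by Pre_); this statement occurs verbatim in both Pythons, so the helper
-- and the degree-counting fold `pvCount` are shared by the two ports.
def pvBump (l : List Int) (i : Int) : List Int :=
  PySem.List.pySetD l i (PySem.List.pyGetD l i 0 + 1)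

-- connection_count = [0] * n ; for a, b in roads: connection_count[a] += 1; connection_count[b] += 1
def pvCount (n : Int) (roads : List (List Int)) : List Int :=
  roads.foldl (fun cc r =>
    match r with
    | [a, b] => pvBump (pvBump cc a) b
    | _ => cc) (List.replicate n.toNat 0)

-- value_assignment = [0] * n ; for value, (city, _) in enumerate(city_connections, 1): va[city] = n - value + 1
def pvAssign (n : Int) (cityConns : List (Int × Int)) : List Int :=
  (PySem.List.enumerate cityConns 1).foldl
    (fun va p => PySem.List.pySetD va p.2.1 (n - p.1 + 1)) (List.replicate n.toNat 0)

def maximumImportance (n : Int) (roads : List (List Int)) : Int :=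
  -- city_connections = sorted(enumerate(connection_count), key=lambda x: x[1], reverse=True)
  let va := pvAssign n
    (PySem.List.sorted (PySem.List.enumerate (pvCount n roads)) (fun x => x.2) true)
  -- total_importance: for a, b in roads: total += value_assignment[a] + value_assignment[b]
  roads.foldl (fun tot r =>
    match r with
    | [a, b] => tot + (PySem.List.pyGetD va a 0 + PySem.List.pyGetD va b 0)
    | _ => tot) 0

-- ===== PORT B =====
def maximumImportance_alt (n : Int) (roads : List (List Int)) : Int :=
  -- degree = [0]*n; counting loop as in Source A; degree.sort()
  let sd := PySem.List.sorted (pvCount n roads) (fun x => x) false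
  -- for value, d in enumerate(degree, start=1): total += d * value
  (PySem.List.enumerate sd 1).foldl (fun tot p => tot + p.2 * p.1) 0

-- ===== PRECONDITION & SPEC =====
-- Pre_ excludes exactly the inputs on which A raises: a road that is not a 2-element
-- list (unpacking ValueError) or a city index outside Python's valid index range
-- [-n, n) of the length-n count list (IndexError).
def Pre_maximumImportance (n : Int) (roads : List (List Int)) : Prop :=
  ∀ r ∈ roads, r.length = 2 ∧ ∀ e ∈ r, -n ≤ e ∧ e < n
instance (n : Int) (roads : List (List Int)) : Decidable (Pre_maximumImportance n roads) := by
  unfold Pre_maximumImportance; infer_instance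

def pvWitness_maximumImportance : Int × List (List Int) := (3, [[0, 1], [1, 2], [0, 2]])

def Spec_maximumImportance (n : Int) (roads : List (List Int)) (out : Int) : Prop := out = maximumImportance_alt n roads
instance (n : Int) (roads : List (List Int)) (out : Int) : Decidable (Spec_maximumImportance n roads out) := by unfold Spec_maximumImportance; infer_instance

-- ===== CLAIM (what is proved, stated in full; the proofs are below) =====
def Claim_equal_maximumImportance : Prop := ∀ (n : Int) (roads : List (List Int)), Dom_maximumImportance n roads → Pre_maximumImportance n roads → Spec_maximumImportance n roads (maximumImportance n roads)

-- ===== LEMMAS AND PROOFS =====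

theorem maximumImportance_witness_ok :
    Dom_maximumImportance pvWitness_maximumImportance.1 pvWitness_maximumImportance.2 ∧
    Pre_maximumImportance pvWitness_maximumImportance.1 pvWitness_maximumImportance.2 := by
  decide

-- the dot product Σ_p l[p] * va[p]
def pvDot (l va : List Int) : Int :=
  ∑ p ∈ Finset.range l.length, l.getD p 0 * va.getD p 0

-- Python index resolution: a valid (possibly negative) index i into a length-len list
-- resolves to a natural position j.
theorem pvIdx_some (len : Nat) (i : Int) (h1 : -(len : Int) ≤ i) (h2 : i < len) :
    ∃ j : Nat, j < len ∧ PySem.List.pyIdx? len i = some j := by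
  by_cases h0 : 0 ≤ i
  · exact ⟨i.toNat, by omega, by simp [PySem.List.pyIdx?, h0, h2]⟩
  · refine ⟨len - (-i).toNat, by omega, ?_⟩
    simp only [PySem.List.pyIdx?, if_neg h0, if_pos h1]

theorem pvGetD_idx {α : Type} (xs : List α) (i : Int) (d : α) (j : Nat)
    (hj : j < xs.length) (h : PySem.List.pyIdx? xs.length i = some j) :
    PySem.List.pyGetD xs i d = xs.getD j d := by
  simp [PySem.List.pyGetD, PySem.List.pyGet?, h, List.getElem?_eq_getElem hj,
    List.getD_eq_getElem l d hj]

theorem pvSetD_idx {α : Type} (xs : List α) (i : Int) (v : α) (j : Nat)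
    (h : PySem.List.pyIdx? xs.length i = some j) :
    PySem.List.pySetD xs i v = xs.set j v := by
  simp [PySem.List.pySetD, PySem.List.pySet?, h]

theorem pvCount_length (n : Int) (roads : List (List Int)) :
    (pvCount n roads).length = n.toNat := by
  unfold pvCount
  suffices h : ∀ (rs : List (List Int)) (cc : List Int),
      (rs.foldl (fun cc r => match r with
        | [a, b] => pvBump (pvBump cc a) b
        | _ => cc) cc).length = cc.length by
    simp [h]
  intro rs
  induction rs with
  | nil => intro cc; rfl
  | cons r rs ih =>
    intro cc
    rw [List.foldl_cons, ih]
    match r with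
    | [] => rfl
    | [a] => rfl
    | [a, b] => simp [pvBump, PySem.List.length_pySetD]
    | a :: b :: c :: t => rfl

-- bumping a valid index adds va[i] to the dot product
theorem pvDot_bump (l va : List Int) (i : Int) (hlen : l.length = va.length)
    (h1 : -(l.length : Int) ≤ i) (h2 : i < l.length) :
    pvDot (pvBump l i) va = pvDot l va + PySem.List.pyGetD va i 0 := by
  obtain ⟨j, hj, hidx⟩ := pvIdx_some l.length i h1 h2
  have hgl : PySem.List.pyGetD l i 0 = l.getD j 0 := pvGetD_idx l i 0 j hj hidx
  have hgv : PySem.List.pyGetD va i 0 = va.getD j 0 := by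
    apply pvGetD_idx va i 0 j (hlen ▸ hj); rwa [← hlen]
  have hset : pvBump l i = l.set j (l.getD j 0 + 1) := by
    rw [pvBump, hgl, pvSetD_idx l i _ j hidx]
  rw [hset, hgv, pvDot, List.length_set, pvDot]
  have hsplit : ∀ p ∈ Finset.range l.length,
      (l.set j (l.getD j 0 + 1)).getD p 0 * va.getD p 0
        = l.getD p 0 * va.getD p 0 + (if p = j then va.getD j 0 else 0) := by
    intro p hp
    rw [Finset.mem_range] at hp
    have hps : p < (l.set j (l.getD j 0 + 1)).length := by simpa using hp
    rw [List.getD_eq_getElem _ _ hps, List.getElem_set, List.getD_eq_getElem _ _ hp]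
    by_cases hpj : p = j
    · subst hpj; rw [if_pos rfl, if_pos rfl, List.getD_eq_getElem _ _ hp]; ring
    · rw [if_neg (fun h => hpj h.symm), if_neg hpj, add_zero]
  rw [Finset.sum_congr rfl hsplit, Finset.sum_add_distrib,
    Finset.sum_ite_eq' (Finset.range l.length) j (fun _ => va.getD j 0)]
  simp [hj]

-- the total-importance fold over roads equals the dot product of the counts with va
theorem pvTotal_eq_dot (va : List Int) : ∀ (rs : List (List Int)) (cc : List Int) (t : Int),
    cc.length = va.length →
    (∀ r ∈ rs, r.length = 2 ∧ ∀ e ∈ r, -(cc.length : Int) ≤ e ∧ e < cc.length) →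
    rs.foldl (fun tot r =>
      match r with
      | [a, b] => tot + (PySem.List.pyGetD va a 0 + PySem.List.pyGetD va b 0)
      | _ => tot) t
      = t + pvDot (rs.foldl (fun cc r =>
          match r with
          | [a, b] => pvBump (pvBump cc a) b
          | _ => cc) cc) va - pvDot cc va := by
  intro rs
  induction rs with
  | nil => intro cc t _ _; simp
  | cons r rs ih =>
    intro cc t hlen hr
    obtain ⟨hr2, hre⟩ := hr r (by simp)
    match r, hr2 with
    | [a, b], _ =>
      have ha := hre a (by simp)
      have hb := hre b (by simp)
      have hlb : (pvBump cc a).length = cc.length := by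
        simp [pvBump, PySem.List.length_pySetD]
      have hlbb : (pvBump (pvBump cc a) b).length = cc.length := by
        simp [pvBump, PySem.List.length_pySetD]
      have hda : pvDot (pvBump cc a) va = pvDot cc va + PySem.List.pyGetD va a 0 :=
        pvDot_bump cc va a hlen ha.1 ha.2
      have hdb : pvDot (pvBump (pvBump cc a) b) va
          = pvDot (pvBump cc a) va + PySem.List.pyGetD va b 0 := by
        apply pvDot_bump _ va b (by rw [hlb, hlen]) <;> rw [hlb]
        exacts [hb.1, hb.2]
      have := ih (pvBump (pvBump cc a) b)
        (t + (PySem.List.pyGetD va a 0 + PySem.List.pyGetD va b 0))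
        (by rw [hlbb, hlen])
        (by intro r' hr'; have := hr r' (by simp [hr']); rwa [hlbb])
      simp only [List.foldl_cons]
      rw [this, hdb, hda]
      ring

-- a fold of assignments at nonnegative indices all different from c leaves position c unchanged
theorem pvAssign_preserve (n : Int) :
    ∀ (ps : List (Int × Int × Int)) (va : List Int) (c : Nat),
    (∀ q ∈ ps, 0 ≤ q.2.1 ∧ q.2.1.toNat ≠ c) →
    (ps.foldl (fun va p => PySem.List.pySetD va p.2.1 (n - p.1 + 1)) va).getD c 0
      = va.getD c 0 := by
  intro ps
  induction ps with
  | nil => intro va c _; rfl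
  | cons q ps ih =>
    intro va c h
    obtain ⟨hq0, hqc⟩ := h q (by simp)
    simp only [List.foldl_cons]
    rw [ih _ c (fun q' hq' => h q' (by simp [hq'])),
      PySem.List.pySetD_of_nonneg _ _ hq0]
    rcases Nat.lt_or_ge c va.length with hc | hc
    · rw [List.getD_eq_getElem _ _ (by simpa using hc), List.getD_eq_getElem _ _ hc,
        List.getElem_set, if_neg hqc]
    · rw [List.getD_eq_default _ _ (by simpa using hc), List.getD_eq_default _ _ hc]

-- after the assignment fold, position q.2.1 holds n - q.1 + 1, for every entry q
theorem pvAssign_get (n : Int) :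
    ∀ (ps : List (Int × Int × Int)) (va : List Int),
    (ps.map (fun q => q.2.1)).Nodup →
    (∀ q ∈ ps, 0 ≤ q.2.1 ∧ q.2.1 < va.length) →
    ∀ q ∈ ps,
      (ps.foldl (fun va p => PySem.List.pySetD va p.2.1 (n - p.1 + 1)) va).getD q.2.1.toNat 0
        = n - q.1 + 1 := by
  intro ps
  induction ps with
  | nil => intro _ _ _ q hq; simp at hq
  | cons p ps ih =>
    intro va hnd hb q hq
    simp only [List.map_cons, List.nodup_cons] at hnd
    obtain ⟨hp0, hplt⟩ := hb p (by simp)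
    simp only [List.foldl_cons]
    rw [List.mem_cons] at hq
    rcases hq with hq | hq
    · subst hq
      rw [pvAssign_preserve n ps _ q.2.1.toNat ?_]
      · rw [PySem.List.pySetD_of_nonneg _ _ hp0]
        have hlt : q.2.1.toNat < va.length := by omega
        rw [List.getD_eq_getElem _ _ (by simpa using hlt), List.getElem_set, if_pos rfl]
      · intro q' hq'
        obtain ⟨h0', _⟩ := hb q' (by simp [hq'])
        refine ⟨h0', fun hc => hnd.1 ?_⟩
        have : q'.2.1 = q.2.1 := by omega
        rw [← this]; exact List.mem_map_of_mem hq'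
    · apply ih _ hnd.2 _ q hq
      intro q' hq'
      obtain ⟨h0', hlt'⟩ := hb q' (by simp [hq'])
      exact ⟨h0', by rwa [PySem.List.pySetD_of_nonneg _ _ hp0, List.length_set]⟩

-- a sum over enumerate(xs, s) as a sum over positions
theorem pvEnum_sum {α : Type} (g : Int → α → Int) (d : α) :
    ∀ (xs : List α) (s : Int),
    ((PySem.List.enumerate xs s).map (fun p => g p.1 p.2)).sum
      = ∑ i ∈ Finset.range xs.length, g (s + i) (xs.getD i d) := by
  intro xs
  induction xs with
  | nil => intro s; simp [PySem.List.enumerate]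
  | cons x xs ih =>
    intro s
    rw [PySem.List.enumerate_cons, List.map_cons, List.sum_cons, ih (s + 1),
      List.length_cons, Finset.sum_range_succ']
    have : ∀ i ∈ Finset.range xs.length,
        g (s + 1 + i) (xs.getD i d) = g (s + ↑(i + 1)) ((x :: xs).getD (i + 1) d) := by
      intro i _
      have : s + 1 + (i : Int) = s + ((i : Nat) + 1 : Nat) := by push_cast; ring
      rw [this]; rfl
    rw [Finset.sum_congr rfl this]
    simp [add_comm]

-- a fold of assignments preserves the length
theorem pvSetFold_length (n : Int) :
    ∀ (ps : List (Int × Int × Int)) (va : List Int),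
    (ps.foldl (fun va p => PySem.List.pySetD va p.2.1 (n - p.1 + 1)) va).length
      = va.length := by
  intro ps
  induction ps with
  | nil => intro va; rfl
  | cons p ps ih =>
    intro va
    rw [List.foldl_cons, ih, PySem.List.length_pySetD]

theorem pvAssign_length (n : Int) (s : List (Int × Int)) :
    (pvAssign n s).length = n.toNat := by
  unfold pvAssign
  rw [pvSetFold_length, List.length_replicate]

theorem pvDot_replicate (m : Nat) (va : List Int) :
    pvDot (List.replicate m (0 : Int)) va = 0 := by
  unfold pvDot
  apply Finset.sum_eq_zero
  intro p hp
  rw [Finset.mem_range, List.length_replicate] at hp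
  rw [List.getD_eq_getElem _ _ (by simpa using hp), List.getElem_replicate, zero_mul]

-- ===== the main argument =====

theorem maximumImportance_eq (n : Int) (roads : List (List Int))
    (hpre : Pre_maximumImportance n roads) :
    maximumImportance n roads = maximumImportance_alt n roads := by
  rcases lt_or_ge n 0 with hn | hn
  · -- n < 0 : Pre_ forces roads = []
    have hroads : roads = [] := by
      cases roads with
      | nil => rfl
      | cons r rs =>
        obtain ⟨h2, he⟩ := hpre r (by simp)
        match r, h2 with
        | [a, b], _ =>
          have := he a (by simp)
          omega
    have h0 : n.toNat = 0 := by omega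
    subst hroads
    simp [maximumImportance, maximumImportance_alt, pvCount, h0, pvAssign,
      PySem.List.sorted]
  · -- 0 ≤ n
    have hLn : ((n.toNat : Nat) : Int) = n := Int.toNat_of_nonneg hn
    -- abbreviations
    set deg := pvCount n roads with hdeg_def
    have hdegL : deg.length = n.toNat := pvCount_length n roads
    set s := PySem.List.sorted (PySem.List.enumerate deg) (fun x => x.2) true with hs_def
    set va := pvAssign n s with hva_def
    have hvaL : va.length = n.toNat := pvAssign_length n s
    have hsperm : s.Perm (PySem.List.enumerate deg) :=
      PySem.List.sorted_perm (PySem.List.enumerate deg) (fun x => x.2) true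
    have hsL : s.length = n.toNat := by
      rw [hsperm.length_eq, PySem.List.length_enumerate, hdegL]
    -- the first components of s are exactly range(n), hence distinct and in bounds
    have hfst : (s.map (fun q => q.1)).Perm (PySem.List.pyRange 0 (deg.length) 1) := by
      have := hsperm.map (fun q : Int × Int => q.1)
      rwa [PySem.List.map_fst_enumerate, zero_add] at this
    have hmem_snd : ∀ q ∈ PySem.List.enumerate s 1, q.2 ∈ s := by
      intro q hq
      have : q.2 ∈ (PySem.List.enumerate s 1).map (fun x => x.2) :=
        List.mem_map_of_mem hq
      rwa [PySem.List.map_snd_enumerate] at this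
    have hbnd : ∀ q ∈ PySem.List.enumerate s 1, 0 ≤ q.2.1 ∧ q.2.1 < deg.length := by
      intro q hq
      have h1 : q.2.1 ∈ s.map (fun q => q.1) := List.mem_map_of_mem (hmem_snd q hq)
      rw [hfst.mem_iff, PySem.List.mem_pyRange_one] at h1
      exact ⟨h1.1, by exact_mod_cast h1.2⟩
    have hnodup : ((PySem.List.enumerate s 1).map (fun q => q.2.1)).Nodup := by
      have he : (PySem.List.enumerate s 1).map (fun q => q.2.1)
          = s.map (fun q => q.1) := by
        rw [show (fun q : Int × Int × Int => q.2.1)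
            = (fun q : Int × Int => q.1) ∘ (fun q : Int × Int × Int => q.2) from rfl,
          ← List.map_map, PySem.List.map_snd_enumerate]
      rw [he]
      exact (hfst.nodup_iff).mpr (PySem.List.nodup_pyRange_one _ _)
    -- A's value is the dot product of the degree list with the value assignment
    have hA : maximumImportance n roads = pvDot deg va := by
      show roads.foldl (fun tot r =>
        match r with
        | [a, b] => tot + (PySem.List.pyGetD va a 0 + PySem.List.pyGetD va b 0)
        | _ => tot) 0 = pvDot deg va
      rw [pvTotal_eq_dot va roads (List.replicate n.toNat 0) 0
        (by rw [List.length_replicate, hvaL])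
        (by
          intro r hr
          obtain ⟨h2, he⟩ := hpre r hr
          refine ⟨h2, fun e hee => ?_⟩
          have := he e hee
          rw [List.length_replicate]
          omega)]
      rw [show roads.foldl (fun cc r =>
          match r with
          | [a, b] => pvBump (pvBump cc a) b
          | _ => cc) (List.replicate n.toNat 0) = deg from rfl]
      rw [pvDot_replicate]
      ring
    -- the dot product, pushed through the sorted permutation and the assignment
    have hdot : pvDot deg va
        = ∑ p ∈ Finset.range s.length, (s.getD p (0, 0)).2 * (n - p) := by
      have e1 : pvDot deg va
          = ((PySem.List.enumerate deg 0).map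
              (fun p => p.2 * va.getD p.1.toNat 0)).sum := by
        rw [pvEnum_sum (fun c x => x * va.getD c.toNat 0) 0 deg 0]
        apply Finset.sum_congr rfl
        intro p _
        simp
      have e2 : ((PySem.List.enumerate deg 0).map
            (fun p => p.2 * va.getD p.1.toNat 0)).sum
          = (s.map (fun p => p.2 * va.getD p.1.toNat 0)).sum :=
        ((hsperm.map _).sum_eq).symm
      have e3 : s.map (fun p => p.2 * va.getD p.1.toNat 0)
          = (PySem.List.enumerate s 1).map
              (fun q => q.2.2 * va.getD q.2.1.toNat 0) := by
        conv_lhs => rw [← PySem.List.map_snd_enumerate s 1]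
        rw [List.map_map]
        rfl
      have e4 : ((PySem.List.enumerate s 1).map
            (fun q => q.2.2 * va.getD q.2.1.toNat 0)).sum
          = ((PySem.List.enumerate s 1).map
              (fun q => q.2.2 * (n - q.1 + 1))).sum := by
        apply congrArg
        apply List.map_congr_left
        intro q hq
        have hg := pvAssign_get n (PySem.List.enumerate s 1)
          (List.replicate n.toNat 0) hnodup
          (by
            intro q' hq'
            have := hbnd q' hq'
            rw [List.length_replicate]
            omega)
          q hq
        rw [show va = (PySem.List.enumerate s 1).foldl
          (fun va p => PySem.List.pySetD va p.2.1 (n - p.1 + 1))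
          (List.replicate n.toNat 0) from rfl, hg]
      have e5 : ((PySem.List.enumerate s 1).map
            (fun q => q.2.2 * (n - q.1 + 1))).sum
          = ∑ p ∈ Finset.range s.length, (s.getD p (0, 0)).2 * (n - p) := by
        rw [pvEnum_sum (fun v (x : Int × Int) => x.2 * (n - v + 1)) (0, 0) s 1]
        apply Finset.sum_congr rfl
        intro p _
        have : n - (1 + (p : Int)) + 1 = n - p := by ring
        rw [this]
      rw [e1, e2, e3, e4, e5]
    -- B's value as a positional sum over the ascending sort
    have hB : maximumImportance_alt n roads
        = ∑ i ∈ Finset.range (PySem.List.sorted deg (fun x => x) false).length,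
            (PySem.List.sorted deg (fun x => x) false).getD i 0 * (1 + i) := by
      show (PySem.List.enumerate (PySem.List.sorted deg (fun x => x) false) 1).foldl
        (fun tot p => tot + p.2 * p.1) 0 = _
      rw [PySem.List.foldl_add _ (fun p : Int × Int => p.2 * p.1) 0, zero_add,
        pvEnum_sum (fun v x => x * v) 0]
    -- the ascending sort is the reverse of the descending degree sequence
    have hdscperm : (s.map (fun q => q.2)).Perm deg := by
      have := hsperm.map (fun q : Int × Int => q.2)
      rwa [PySem.List.map_snd_enumerate] at this
    have hasc : PySem.List.sorted deg (fun x => x) false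
        = (s.map (fun q => q.2)).reverse := by
      apply PySem.List.sorted_id_eq_of_perm_of_pairwise
      · exact ((s.map (fun q => q.2)).reverse_perm).trans hdscperm
      · rw [List.pairwise_reverse]
        exact (PySem.List.sorted_pairwise_rev (PySem.List.enumerate deg)
          (fun x : Int × Int => x.2)).map _ (fun a b h => h)
    -- flip the sum
    rw [hA, hdot, hB, hasc]
    have hKlen : (s.map (fun q => q.2)).length = s.length := by simp
    rw [List.length_reverse, hKlen]
    rw [← Finset.sum_range_reflect
      (fun p => (s.getD p (0, 0)).2 * (n - p)) s.length]
    apply Finset.sum_congr rfl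
    intro j hj
    rw [Finset.mem_range] at hj
    have hj' : j < (s.map (fun q => q.2)).reverse.length := by
      rw [List.length_reverse, hKlen]; exact hj
    have hrev : (s.map (fun q => q.2)).reverse.getD j 0
        = (s.getD (s.length - 1 - j) (0, 0)).2 := by
      have hlt : s.length - 1 - j < s.length := by omega
      rw [List.getD_eq_getElem _ _ hj', List.getElem_reverse, List.getElem_map,
        List.getD_eq_getElem _ _ hlt]
      simp only [List.length_map]
    rw [hrev]
    have hfac : n - ((s.length - 1 - j : Nat) : Int) = 1 + j := by
      have hns : ((s.length : Nat) : Int) = n := by rw [hsL, hLn]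
      omega
    rw [hfac]

-- ===== VERDICT (by name: the statement is the Claim_ definition above) =====
theorem maximumImportance_spec : Claim_equal_maximumImportance := by
  intro n roads _ hpre
  unfold Spec_maximumImportance
  exact maximumImportance_eq n roads hpre
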